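-- pv_equiv track=rewrite | github.com/Rcrossmeister/DuPa-ASA | reproduce/text-summary/Extract_Summary_English.py | dic_order_value_and_get_key
-- ===== SOURCE A (Python) =====
-- def dic_order_value_and_get_key(dicts, count):
--     # by hellojesson
--      # 字典根据value排序，并且获取value排名前几的key
--     final_result = []
--     # 先对字典排序
--     sorted_dic = sorted([(k, v) for k, v in dicts.items()], reverse=True)
--     tmp_set = set()  # 定义集合 会去重元素
--     for item in sorted_dic:
--         tmp_set.add(item[1])
--     for list_item in sorted(tmp_set, reverse=True)[:count]:
--         for dic_item in sorted_dic:
--             if dic_item[1] == list_item: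
--                 final_result.append(dic_item[0])
--     return final_result
-- ===== SOURCE B (Python) =====
-- def dic_order_value_and_get_key(dicts, count):
--     # group keys by value in one pass, then emit keys of the top-`count`
--     # distinct values (keys in descending order within each value)
--     groups = {}
--     for k, v in dicts.items():
--         groups.setdefault(v, []).append(k)
--     result = []
--     for v in sorted(groups, reverse=True)[:count]:
--         result.extend(sorted(groups[v], reverse=True))
--     return result
-- ===== Notes on version B (the rewrite author's own statement) =====
-- stated objective: faster
-- what changed: B replaces A's sort-everything-then-rescan-for-each-top-value scheme (an inner pass over the whole sorted item list per distinct value) by a single grouping pass that buckets keys by value in a dict, then emits the sorted key bucket of each of the top-count distinct values.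
import Mathlib
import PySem

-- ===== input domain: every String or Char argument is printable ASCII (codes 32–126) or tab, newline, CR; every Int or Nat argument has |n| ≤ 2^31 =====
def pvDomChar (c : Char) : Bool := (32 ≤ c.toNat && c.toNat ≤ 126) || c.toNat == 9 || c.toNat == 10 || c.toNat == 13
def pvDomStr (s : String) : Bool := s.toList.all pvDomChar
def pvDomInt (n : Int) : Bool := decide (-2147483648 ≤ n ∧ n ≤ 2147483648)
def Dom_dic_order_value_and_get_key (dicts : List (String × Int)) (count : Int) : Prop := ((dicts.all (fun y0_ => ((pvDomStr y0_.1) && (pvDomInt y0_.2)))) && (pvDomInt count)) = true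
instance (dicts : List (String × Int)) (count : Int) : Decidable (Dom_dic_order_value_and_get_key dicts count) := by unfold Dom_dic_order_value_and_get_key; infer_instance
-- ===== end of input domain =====

-- B buckets keys by value in one dict pass instead of rescanning the fully
-- sorted item list once per distinct value (objective: faster, asymptotic).

-- ===== PORT A =====
def dic_order_value_and_get_key (dicts : List (String × Int)) (count : Int) : List String :=
  -- sorted_dic = sorted([(k, v) for k, v in dicts.items()], reverse=True)
  let sorted_dic := PySem.List.sorted2 dicts (fun kv => kv.1) (fun kv => kv.2) true
  -- tmp_set = set(); for item in sorted_dic: tmp_set.add(item[1])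
  let tmp_set := sorted_dic.foldl (fun (s : PySem.Set Int) item => s.add item.2) PySem.Set.empty
  -- for list_item in sorted(tmp_set, reverse=True)[:count]: for dic_item in sorted_dic: …
  (PySem.List.slice (PySem.List.sorted (tmp_set : List Int) (fun x => x) true) none (some count)).foldl
    (fun final_result list_item =>
      sorted_dic.foldl
        (fun acc dic_item => if dic_item.2 == list_item then acc ++ [dic_item.1] else acc)
        final_result)
    []

-- ===== PORT B =====
def dic_order_value_and_get_key_alt (dicts : List (String × Int)) (count : Int) : List String :=
  -- groups = {}; for k, v in dicts.items(): groups.setdefault(v, []).append(k)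
  let groups := dicts.foldl
    (fun (d : PySem.Dict Int (List String)) kv => d.modify kv.2 [] (fun g => g ++ [kv.1]))
    PySem.Dict.empty
  -- for v in sorted(groups, reverse=True)[:count]: result.extend(sorted(groups[v], reverse=True))
  (PySem.List.slice (PySem.List.sorted groups.keys (fun x => x) true) none (some count)).foldl
    (fun result v => result ++ PySem.List.sorted (groups.getD v []) (fun x => x) true)
    []

-- ===== PRECONDITION & SPEC =====
def Spec_dic_order_value_and_get_key (dicts : List (String × Int)) (count : Int) (out : List String) : Prop := out = dic_order_value_and_get_key_alt dicts count
instance (dicts : List (String × Int)) (count : Int) (out : List String) : Decidable (Spec_dic_order_value_and_get_key dicts count out) := by unfold Spec_dic_order_value_and_get_key; infer_instance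

-- ===== CLAIM (what is proved, stated in full; the proofs are below) =====
def Claim_equal_dic_order_value_and_get_key : Prop := ∀ (dicts : List (String × Int)) (count : Int), Dom_dic_order_value_and_get_key dicts count → Spec_dic_order_value_and_get_key dicts count (dic_order_value_and_get_key dicts count)

-- ===== LEMMAS AND PROOFS =====

-- insertBy preserves Pairwise R when `before` decides R in both directions and R is transitive
lemma insertBy_pairwise_of {α : Type} (R : α → α → Prop) (before : α → α → Bool)
    (h1 : ∀ a b, before a b = true → R a b) (h2 : ∀ a b, before a b = false → R b a)
    (htr : ∀ a b c, R a b → R b c → R a c) (x : α) :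
    ∀ ys : List α, ys.Pairwise R → (PySem.List.insertBy before x ys).Pairwise R := by
  intro ys
  induction ys with
  | nil => intro _; simp [PySem.List.insertBy]
  | cons y ys ih =>
    intro hp
    rw [show PySem.List.insertBy before x (y :: ys)
        = if before x y then x :: y :: ys else y :: PySem.List.insertBy before x ys from rfl]
    rcases List.pairwise_cons.1 hp with ⟨hy, hys⟩
    by_cases h : before x y = true
    · simp only [h, if_true]
      refine List.pairwise_cons.2 ⟨?_, hp⟩
      intro z hz
      rcases List.mem_cons.1 hz with rfl | hz
      · exact h1 _ _ h
      · exact htr _ _ _ (h1 _ _ h) (hy _ hz)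
    · simp only [h]
      refine List.pairwise_cons.2 ⟨?_, ih hys⟩
      intro z hz
      rcases (PySem.List.insertBy_mem_iff before x z ys).1 hz with rfl | hz
      · exact h2 _ _ (Bool.eq_false_iff.2 h ▸ rfl)
      · exact hy _ hz
  
-- folding insertBy keeps the invariant
lemma foldl_insertBy_pairwise_of {α : Type} (R : α → α → Prop) (before : α → α → Bool)
    (h1 : ∀ a b, before a b = true → R a b) (h2 : ∀ a b, before a b = false → R b a)
    (htr : ∀ a b c, R a b → R b c → R a c) :
    ∀ (xs acc : List α), acc.Pairwise R →
      (xs.foldl (fun acc x => PySem.List.insertBy before x acc) acc).Pairwise R := by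
  intro xs
  induction xs with
  | nil => intro acc h; exact h
  | cons x xs ih =>
    intro acc h
    exact ih _ (insertBy_pairwise_of R before h1 h2 htr x acc h)

-- A's reverse-sorted pair list is descending in the key (first) component
lemma sorted2_rev_pairwise_fst (dicts : List (String × Int)) :
    (PySem.List.sorted2 dicts (fun kv => kv.1) (fun kv => kv.2) true).Pairwise
      (fun a b : String × Int => b.1 ≤ a.1) := by
  rw [show PySem.List.sorted2 dicts (fun kv => kv.1) (fun kv => kv.2) true
      = List.foldl (fun acc x => PySem.List.insertBy
          (fun (a b : String × Int) => decide (b.1 < a.1) || (!decide (a.1 < b.1) && decide (b.2 < a.2)))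
          x acc) [] dicts from rfl]
  refine foldl_insertBy_pairwise_of _ _ ?_ ?_ ?_ dicts [] List.Pairwise.nil
  · intro a b h
    simp only [Bool.or_eq_true, Bool.and_eq_true, decide_eq_true_eq] at h
    rcases h with h | ⟨h, _⟩
    · exact le_of_lt h
    · simp only [Bool.not_eq_eq_eq_not, Bool.not_true, decide_eq_false_iff_not] at h
      exact le_of_not_gt h
  · intro a b h
    simp only [Bool.or_eq_false_iff, decide_eq_false_iff_not] at h
    exact le_of_not_gt h.1
  · intro a b c hab hbc
    exact le_trans hbc hab

-- the bucket of value v, as built by B's grouping fold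
lemma groups_getD (dicts : List (String × Int)) (v : Int) :
    (dicts.foldl
      (fun (d : PySem.Dict Int (List String)) kv => d.modify kv.2 [] (fun g => g ++ [kv.1]))
      PySem.Dict.empty).getD v []
    = (dicts.filter (fun kv => kv.2 == v)).map (fun kv => kv.1) := by
  have h := PySem.Dict.getD_foldl_modify_append (dicts.map (fun kv => (kv.2, kv.1)))
    (PySem.Dict.empty : PySem.Dict Int (List String)) v
  rw [List.foldl_map] at h
  simpa [List.filter_map, List.map_map, Function.comp] using h


-- the distinct values seen by B are the dict keys, nodup
lemma groups_keys (dicts : List (String × Int)) :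
    (dicts.foldl
      (fun (d : PySem.Dict Int (List String)) kv => d.modify kv.2 [] (fun g => g ++ [kv.1]))
      PySem.Dict.empty).keys
    = PySem.Set.ofList (dicts.map (fun kv => kv.2)) := by
  have h := PySem.Dict.keys_foldl_modify_key dicts (fun kv => kv.2) ([] : List String)
    (fun _ kv => fun g => g ++ [kv.1]) PySem.Dict.empty
  simpa [PySem.Dict.keys_empty, PySem.Set.update, PySem.Set.ofList] using h

-- A's tmp_set is the set of values of the (sorted) items
lemma tmp_set_eq (dicts : List (String × Int)) :
    ((PySem.List.sorted2 dicts (fun kv => kv.1) (fun kv => kv.2) true).foldl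
      (fun (s : PySem.Set Int) item => s.add item.2) PySem.Set.empty)
    = PySem.Set.ofList ((PySem.List.sorted2 dicts (fun kv => kv.1) (fun kv => kv.2) true).map (fun kv => kv.2)) := by
  rw [PySem.Set.ofList, List.foldl_map]

-- the two distinct-value lists are permutations of each other
lemma values_perm (dicts : List (String × Int)) :
    (PySem.Set.ofList ((PySem.List.sorted2 dicts (fun kv => kv.1) (fun kv => kv.2) true).map (fun kv => kv.2)) : List Int).Perm
      (PySem.Set.ofList (dicts.map (fun kv => kv.2))) := by
  refine (List.perm_ext_iff_of_nodup (PySem.Set.nodup_ofList _) (PySem.Set.nodup_ofList _)).2 ?_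
  intro a
  rw [PySem.Set.mem_ofList, PySem.Set.mem_ofList]
  constructor <;> intro h
  · rcases List.mem_map.1 h with ⟨kv, hkv, rfl⟩
    exact List.mem_map.2 ⟨kv, ((PySem.List.sorted2_perm dicts _ _ true).mem_iff).1 hkv, rfl⟩
  · rcases List.mem_map.1 h with ⟨kv, hkv, rfl⟩
    exact List.mem_map.2 ⟨kv, ((PySem.List.sorted2_perm dicts _ _ true).mem_iff).2 hkv, rfl⟩

-- hence the two sorted distinct-value lists coincide
lemma values_sorted_eq (dicts : List (String × Int)) :
    PySem.List.sorted
      (PySem.Set.ofList ((PySem.List.sorted2 dicts (fun kv => kv.1) (fun kv => kv.2) true).map (fun kv => kv.2)) : List Int)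
      (fun x => x) true
    = PySem.List.sorted (PySem.Set.ofList (dicts.map (fun kv => kv.2)) : List Int) (fun x => x) true := by
  set L := (PySem.Set.ofList ((PySem.List.sorted2 dicts (fun kv => kv.1) (fun kv => kv.2) true).map (fun kv => kv.2)) : List Int)
  set M := (PySem.Set.ofList (dicts.map (fun kv => kv.2)) : List Int)
  have hperm : (PySem.List.sorted L (fun x => x) true).Perm M :=
    (PySem.List.sorted_perm L _ true).trans (values_perm dicts)
  have hnd : (PySem.List.sorted L (fun x => x) true).Nodup :=
    (PySem.List.sorted_perm L _ true).nodup_iff.2 (PySem.Set.nodup_ofList _)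
  have hge : (PySem.List.sorted L (fun x => x) true).Pairwise (fun a b : Int => b ≤ a) :=
    PySem.List.sorted_pairwise_rev L (fun x => x)
  have hgt : (PySem.List.sorted L (fun x => x) true).Pairwise (fun a b : Int => b < a) := by
    have := List.Pairwise.and hge hnd
    exact this.imp (fun {a b} h => lt_of_le_of_ne h.1 (Ne.symm h.2))
  exact (PySem.List.sorted_rev_eq_of_perm_of_pairwise_gt M _ (fun x => x) hperm hgt).symm

-- per distinct value: A's rescan of the sorted items = B's sorted bucket
lemma bucket_eq (dicts : List (String × Int)) (v : Int) :
    ((PySem.List.sorted2 dicts (fun kv => kv.1) (fun kv => kv.2) true).filter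
        (fun kv => kv.2 == v)).map (fun kv => kv.1)
    = PySem.List.sorted ((dicts.filter (fun kv => kv.2 == v)).map (fun kv => kv.1)) (fun x => x) true := by
  set sd := PySem.List.sorted2 dicts (fun kv => kv.1) (fun kv => kv.2) true with hsd
  have hperm : (PySem.List.sorted ((dicts.filter (fun kv => kv.2 == v)).map (fun kv => kv.1)) (fun x => x) true).Perm
      ((sd.filter (fun kv => kv.2 == v)).map (fun kv => kv.1)) := by
    refine (PySem.List.sorted_perm _ _ true).trans ?_
    exact ((PySem.List.sorted2_perm dicts (fun kv => kv.1) (fun kv => kv.2) true).symm.filter _).map _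
  have h1 : ((sd.filter (fun kv => kv.2 == v)).map (fun kv => kv.1)).Pairwise
      (fun a b : String => b ≤ a) := by
    refine List.Pairwise.map _ (fun a b h => h) ?_
    exact (sorted2_rev_pairwise_fst dicts).filter _
  have h2 : (PySem.List.sorted ((dicts.filter (fun kv => kv.2 == v)).map (fun kv => kv.1)) (fun x => x) true).Pairwise
      (fun a b : String => b ≤ a) := PySem.List.sorted_pairwise_rev _ _
  exact (List.Perm.eq_of_pairwise (fun a b _ _ hab hba => le_antisymm hba hab) h2 h1 hperm).symm

-- ===== VERDICT (by name: the statement is the Claim_ definition above) =====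
theorem dic_order_value_and_get_key_spec : Claim_equal_dic_order_value_and_get_key := by
  intro dicts count _
  unfold Spec_dic_order_value_and_get_key
  unfold dic_order_value_and_get_key dic_order_value_and_get_key_alt
  simp only [PySem.List.foldl_append_if, PySem.List.foldl_append_eq_flatMap, List.nil_append]
  rw [tmp_set_eq, values_sorted_eq, groups_keys]
  congr 1
  funext v
  rw [groups_getD, bucket_eq]
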